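-- pv_equiv track=rewrite | github.com/whyj107/CodeWar | 20230406_Sum Of Regular Numbers.py | sum_of_regular_numbers
-- ===== SOURCE A (Python) =====
-- def sum_of_regular_numbers(arr):
--     tmp = {}
--     idx = 0
--     for a, b in zip(arr, arr[1:]):
--         tmp.setdefault(b-a, [])
--         if idx - 1 in tmp[b - a] or tmp[b - a] == []:
--             tmp[b - a].append(idx)
--         else:
--             tmp[b - a] = [idx]
--         idx += 1
--     result = 0
--     for k, v in tmp.items():
--         if len(v) > 1:
--             result += sum(arr[v[0]:v[-1]+2])
--     return result
-- ===== SOURCE B (Python) =====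
-- def sum_of_regular_numbers(arr):
--     # One pass over the consecutive differences, detecting maximal runs of an
--     # equal difference; a dict keeps only the LAST run (start, end) per difference.
--     diffs = [arr[i + 1] - arr[i] for i in range(len(arr) - 1)]
--     n = len(diffs)
--     last_run = {}
--     i = 0
--     while i < n:
--         j = i
--         while j + 1 < n and diffs[j + 1] == diffs[i]:
--             j += 1
--         last_run[diffs[i]] = (i, j)
--         i = j + 1
--     total = 0
--     for start, end in last_run.values():
--         if end > start:
--             total += sum(arr[start:end + 2])
--     return total
-- ===== Notes on version B (the rewrite author's own statement) =====
-- stated objective: simpler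
-- what changed: A grows per-difference lists of pair indices in a dict, testing 'idx-1 in list' at every pair and resetting the list on a break; B computes the difference list once, detects maximal runs of equal differences in a single two-pointer pass and keeps only the last run's (start, end) per difference, then sums the covered slices.
import Mathlib
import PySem

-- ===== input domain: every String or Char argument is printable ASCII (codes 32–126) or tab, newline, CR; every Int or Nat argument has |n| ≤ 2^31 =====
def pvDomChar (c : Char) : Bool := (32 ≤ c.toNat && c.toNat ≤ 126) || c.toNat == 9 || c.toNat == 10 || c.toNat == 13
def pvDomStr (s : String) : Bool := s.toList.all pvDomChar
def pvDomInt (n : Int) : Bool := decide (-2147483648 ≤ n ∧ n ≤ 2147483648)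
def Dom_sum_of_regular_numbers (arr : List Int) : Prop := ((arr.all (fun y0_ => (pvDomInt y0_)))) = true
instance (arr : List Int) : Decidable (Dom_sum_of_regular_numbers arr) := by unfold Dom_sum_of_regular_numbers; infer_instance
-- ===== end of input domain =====

-- B replaces A's per-index dict of index-lists (with a membership test per pair) by a single
-- run-detection pass over the consecutive differences, keeping only (start, end) of the last
-- run per difference; objective: simpler. Equivalence proved on all inputs (both are total).

-- ===== PORT A =====
-- loop body of A's first for-loop: p = (idx, (a, b))
def pvAStep (tmp : PySem.Dict Int (List Int)) (p : Int × (Int × Int)) : PySem.Dict Int (List Int) :=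
  let tmp1 := tmp.setdefault (p.2.2 - p.2.1) ([] : List Int)   -- tmp.setdefault(b-a, [])
  let v := tmp1.getD (p.2.2 - p.2.1) []                        -- tmp[b-a]
  if p.1 - 1 ∈ v ∨ v = [] then tmp1.insert (p.2.2 - p.2.1) (v ++ [p.1])  -- .append(idx)
  else tmp1.insert (p.2.2 - p.2.1) [p.1]                       -- tmp[b-a] = [idx]

def sum_of_regular_numbers (arr : List Int) : Int :=
  -- zip(arr, arr[1:]) with the running idx = enumerate of the zipped pairs
  let tmp := (PySem.List.enumerate (List.zip arr (PySem.List.slice arr (some 1) none))).foldl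
    pvAStep PySem.Dict.empty
  -- second loop over tmp.items; v[0]/v[-1] are guarded by len(v) > 1, so headD/getLastD are exact
  tmp.items.foldl (fun result kv =>
    if 1 < kv.2.length then
      result + (PySem.List.slice arr (some (kv.2.headD 0)) (some (kv.2.getLastD 0 + 2))).sum
    else result) 0

-- ===== PORT B =====
-- inner while: extend j while the next difference (index in range, so getD is exact) equals diffs[i]
def pvRunEnd (diffs : List Int) (d : Int) (j : Nat) : Nat :=
  if h : j + 1 < diffs.length ∧ diffs.getD (j + 1) 0 = d then pvRunEnd diffs d (j + 1) else j
termination_by diffs.length - j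

theorem pvRunEnd_le (diffs : List Int) (d : Int) (j : Nat) : j ≤ pvRunEnd diffs d j := by
  unfold pvRunEnd
  split
  · exact le_trans (Nat.le_succ j) (pvRunEnd_le diffs d (j + 1))
  · exact le_refl j
termination_by diffs.length - j

-- outer while over run starts, overwriting last_run[diffs[i]] = (i, j)
def pvRuns (diffs : List Int) (i : Nat) (acc : PySem.Dict Int (Int × Int)) :
    PySem.Dict Int (Int × Int) :=
  if h : i < diffs.length then
    let j := pvRunEnd diffs (diffs.getD i 0) i
    pvRuns diffs (j + 1) (acc.insert (diffs.getD i 0) ((i : Int), (j : Int)))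
  else acc
termination_by diffs.length - i
decreasing_by have := pvRunEnd_le diffs (diffs.getD i 0) i; omega

def sum_of_regular_numbers_alt (arr : List Int) : Int :=
  -- diffs = [arr[i+1] - arr[i] for i in range(len(arr)-1)]; indices are in range, getD is exact
  let diffs := (List.range (arr.length - 1)).map (fun i => arr.getD (i + 1) 0 - arr.getD i 0)
  let lastRun := pvRuns diffs 0 PySem.Dict.empty
  lastRun.values.foldl (fun total se =>
    if se.1 < se.2 then total + (PySem.List.slice arr (some se.1) (some (se.2 + 2))).sum
    else total) 0

-- ===== PRECONDITION & SPEC =====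
def Spec_sum_of_regular_numbers (arr : List Int) (out : Int) : Prop := out = sum_of_regular_numbers_alt arr
instance (arr : List Int) (out : Int) : Decidable (Spec_sum_of_regular_numbers arr out) := by unfold Spec_sum_of_regular_numbers; infer_instance

-- ===== CLAIM (what is proved, stated in full; the proofs are below) =====
def Claim_equal_sum_of_regular_numbers : Prop := ∀ (arr : List Int), Dom_sum_of_regular_numbers arr → Spec_sum_of_regular_numbers arr (sum_of_regular_numbers arr)

-- ===== LEMMAS AND PROOFS =====


-- The consecutive integers s..e as a list of Int (A's stored index list for a run (s,e))
def pvRangeI (s e : Int) : List Int :=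
  (List.range' s.toNat (e.toNat + 1 - s.toNat)).map (fun (n : Nat) => (n : Int))

theorem pvRangeI_singleton (m : Int) (h : 0 ≤ m) : pvRangeI m m = [m] := by
  unfold pvRangeI
  have : m.toNat + 1 - m.toNat = 1 := by omega
  rw [this]
  simp [List.range'_succ, h]

theorem pvRangeI_ne_nil (s e : Int) (h0 : 0 ≤ s) (h1 : s ≤ e) : pvRangeI s e ≠ [] := by
  unfold pvRangeI
  have : e.toNat + 1 - s.toNat = (e.toNat - s.toNat) + 1 := by omega
  rw [this, List.range'_succ]
  simp

theorem mem_pvRangeI (s e x : Int) (h0 : 0 ≤ s) (h1 : s ≤ e) :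
    x ∈ pvRangeI s e ↔ s ≤ x ∧ x ≤ e := by
  unfold pvRangeI
  simp [List.mem_range'_1]
  constructor
  · rintro ⟨a, ⟨ha1, ha2⟩, rfl⟩; omega
  · intro hx; exact ⟨x.toNat, ⟨by omega, by omega⟩, by omega⟩

theorem pvRangeI_append (s e : Int) (h0 : 0 ≤ s) (h1 : s ≤ e) :
    pvRangeI s e ++ [e + 1] = pvRangeI s (e + 1) := by
  unfold pvRangeI
  have h2 : (e + 1).toNat + 1 - s.toNat = (e.toNat + 1 - s.toNat) + 1 := by omega
  rw [h2, List.range'_concat, List.map_append]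
  congr 1
  simp
  omega

theorem get?_dictMap (st : PySem.Dict Int (Int × Int)) (tmp : PySem.Dict Int (List Int))
    (h : tmp.items = st.items.map (fun q => (q.1, pvRangeI q.2.1 q.2.2))) (k : Int) :
    tmp.get? k = (st.get? k).map (fun v => pvRangeI v.1 v.2) := by
  unfold PySem.Dict.get?
  rw [h, List.find?_map]
  have he : ((fun (p : Int × List Int) => p.1 == k) ∘ (fun (q : Int × (Int × Int)) => (q.1, pvRangeI q.2.1 q.2.2))) = (fun p => p.1 == k) := rfl
  rw [he]
  cases st.items.find? (fun p => p.1 == k) <;> rfl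

theorem contains_dictMap (st : PySem.Dict Int (Int × Int)) (tmp : PySem.Dict Int (List Int))
    (h : tmp.items = st.items.map (fun q => (q.1, pvRangeI q.2.1 q.2.2))) (k : Int) :
    tmp.contains k = st.contains k := by
  rw [PySem.Dict.contains_eq_isSome_get?, PySem.Dict.contains_eq_isSome_get?,
    get?_dictMap st tmp h k]
  cases st.get? k <;> rfl

theorem insert_dictMap (st : PySem.Dict Int (Int × Int)) (tmp : PySem.Dict Int (List Int))
    (h : tmp.items = st.items.map (fun q => (q.1, pvRangeI q.2.1 q.2.2)))
    (k : Int) (v : Int × Int) :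
    (tmp.insert k (pvRangeI v.1 v.2)).items
      = (st.insert k v).items.map (fun q => (q.1, pvRangeI q.2.1 q.2.2)) := by
  unfold PySem.Dict.insert
  rw [contains_dictMap st tmp h k]
  by_cases hc : st.contains k = true
  · simp only [hc, if_pos, h, List.map_map]
    apply List.map_congr_left
    intro q _
    by_cases hq : q.1 = k
    · simp [hq]
    · simp [hq, Function.comp]
  · simp [hc, h]

def pvSStep (st : PySem.Dict Int (Int × Int) × Option Int) (q : Int × Int) :
    PySem.Dict Int (Int × Int) × Option Int :=
  if st.2 = some q.2 then
    (st.1.insert q.2 ((st.1.getD q.2 (0, 0)).1, q.1), some q.2)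
  else (st.1.insert q.2 (q.1, q.1), some q.2)

def pvStepD (tmp : PySem.Dict Int (List Int)) (q : Int × Int) : PySem.Dict Int (List Int) :=
  let tmp1 := tmp.setdefault q.2 ([] : List Int)
  let v := tmp1.getD q.2 []
  if q.1 - 1 ∈ v ∨ v = [] then tmp1.insert q.2 (v ++ [q.1]) else tmp1.insert q.2 [q.1]

def pvInv (m : Int) (tmp : PySem.Dict Int (List Int))
    (st : PySem.Dict Int (Int × Int)) (prev : Option Int) : Prop :=
  tmp.items = st.items.map (fun q => (q.1, pvRangeI q.2.1 q.2.2)) ∧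
  st.keys.Nodup ∧
  (∀ q ∈ st.items, 0 ≤ q.2.1 ∧ q.2.1 ≤ q.2.2 ∧ q.2.2 < m) ∧
  (∀ q ∈ st.items, q.2.2 = m - 1 → prev = some q.1) ∧
  (∀ d, prev = some d → ∃ s, st.get? d = some (s, m - 1))

theorem pvInv_step (m : Int) (tmp : PySem.Dict Int (List Int))
    (st : PySem.Dict Int (Int × Int)) (prev : Option Int) (d : Int)
    (hm : 0 ≤ m) (h : pvInv m tmp st prev) :
    pvInv (m + 1) (pvStepD tmp (m, d)) (pvSStep (st, prev) (m, d)).1 (pvSStep (st, prev) (m, d)).2 := by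
  obtain ⟨h1, h2, h3, h4, h5⟩ := h
  have hget := get?_dictMap st tmp h1
  have hcont := contains_dictMap st tmp h1
  cases hsd : st.get? d with
  | none =>
    -- new key: setdefault inserts [], then the v = [] branch appends m
    have hprev : prev ≠ some d := by
      intro hp
      obtain ⟨s, hs⟩ := h5 d hp
      rw [hsd] at hs; simp at hs
    have hc : st.contains d = false := by
      rw [PySem.Dict.contains_eq_isSome_get?, hsd]; rfl
    have hctmp : tmp.contains d = false := by rw [hcont, hc]
    have hstep : pvStepD tmp (m, d) = tmp.insert d [m] := by
      unfold pvStepD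
      simp only
      rw [PySem.Dict.setdefault_of_not_contains tmp ([] : List Int) hctmp]
      rw [PySem.Dict.getD_insert_self]
      rw [if_pos (Or.inr rfl)]
      rw [PySem.Dict.insert_insert_self]
      rfl
    have hspec : pvSStep (st, prev) (m, d) = (st.insert d (m, m), some d) := by
      unfold pvSStep
      simp [hprev]
    rw [hstep, hspec]
    refine ⟨?_, PySem.Dict.nodup_keys_insert st d (m, m) h2, ?_, ?_, ?_⟩
    · have := insert_dictMap st tmp h1 d (m, m)
      rw [pvRangeI_singleton m hm] at this
      exact this
    · intro q hq
      rcases (PySem.Dict.mem_items_insert st d (m, m) q).1 hq with rfl | ⟨hmem, _⟩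
      · exact ⟨hm, le_refl m, by show m < m + 1; omega⟩
      · have := h3 q hmem; exact ⟨this.1, this.2.1, by omega⟩
    · intro q hq hq2
      rcases (PySem.Dict.mem_items_insert st d (m, m) q).1 hq with rfl | ⟨hmem, hne⟩
      · rfl
      · have := (h3 q hmem).2.2; omega
    · intro d' hd'
      have : d' = d := by injection hd' with hh; exact hh.symm
      subst this
      refine ⟨m, ?_⟩
      rw [PySem.Dict.get?_insert_self]
      congr 2
      omega
  | some v0 =>
    obtain ⟨s0, e0⟩ := v0
    have hmem0 : (d, (s0, e0)) ∈ st.items := PySem.Dict.mem_items_of_get?_eq_some st hsd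
    obtain ⟨hb0, hb1, hb2⟩ := h3 _ hmem0
    simp only at hb0 hb1 hb2
    have hc : st.contains d = true := by
      rw [PySem.Dict.contains_eq_isSome_get?, hsd]; rfl
    have hctmp : tmp.contains d = true := by rw [hcont, hc]
    have htmpget : tmp.get? d = some (pvRangeI s0 e0) := by rw [hget, hsd]; rfl
    have hsdef : tmp.setdefault d ([] : List Int) = tmp := PySem.Dict.setdefault_of_contains tmp ([] : List Int) hctmp
    have hgetD : tmp.getD d [] = pvRangeI s0 e0 := PySem.Dict.getD_of_get?_eq_some tmp ([] : List Int) htmpget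
    have hne : pvRangeI s0 e0 ≠ [] := pvRangeI_ne_nil s0 e0 hb0 hb1
    have hmemiff : (m - 1 ∈ pvRangeI s0 e0) ↔ e0 = m - 1 := by
      rw [mem_pvRangeI s0 e0 (m - 1) hb0 hb1]
      omega
    by_cases hlast : e0 = m - 1
    · -- continuing run: prev = some d, append m
      have hprev : prev = some d := h4 _ hmem0 hlast
      have hstep : pvStepD tmp (m, d) = tmp.insert d (pvRangeI s0 e0 ++ [m]) := by
        unfold pvStepD
        simp only [hsdef, hgetD]
        rw [if_pos (Or.inl (hmemiff.2 hlast))]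
      have hspec : pvSStep (st, prev) (m, d) = (st.insert d (s0, m), some d) := by
        unfold pvSStep
        rw [if_pos hprev]
        simp only
        rw [PySem.Dict.getD_of_get?_eq_some st ((0,0) : Int × Int) hsd]
      rw [hstep, hspec]
      have happ : pvRangeI s0 e0 ++ [m] = pvRangeI s0 m := by
        have := pvRangeI_append s0 e0 hb0 hb1
        rw [show e0 + 1 = m by omega] at this
        exact this
      refine ⟨?_, PySem.Dict.nodup_keys_insert st d (s0, m) h2, ?_, ?_, ?_⟩
      · rw [happ]
        exact insert_dictMap st tmp h1 d (s0, m)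
      · intro q hq
        rcases (PySem.Dict.mem_items_insert st d (s0, m) q).1 hq with rfl | ⟨hmem, _⟩
        · exact ⟨hb0, by show s0 ≤ m; omega, by show m < m + 1; omega⟩
        · have := h3 q hmem; exact ⟨this.1, this.2.1, by omega⟩
      · intro q hq hq2
        rcases (PySem.Dict.mem_items_insert st d (s0, m) q).1 hq with rfl | ⟨hmem, hne2⟩
        · rfl
        · have := (h3 q hmem).2.2; omega
      · intro d' hd'
        have : d' = d := by injection hd' with hh; exact hh.symm
        subst this
        refine ⟨s0, ?_⟩
        rw [PySem.Dict.get?_insert_self]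
        congr 2; omega
    · -- broken run: m-1 ∉ v, v ≠ [] → reset to [m]; prev ≠ some d
      have hprev : prev ≠ some d := by
        intro hp
        obtain ⟨s, hs⟩ := h5 d hp
        rw [hsd] at hs
        injection hs with hh
        injection hh with hh1 hh2
        exact hlast hh2
      have hstep : pvStepD tmp (m, d) = tmp.insert d [m] := by
        unfold pvStepD
        simp only [hsdef, hgetD]
        rw [if_neg (by rintro (hmm | hnil); exacts [hlast (hmemiff.1 hmm), hne hnil])]
      have hspec : pvSStep (st, prev) (m, d) = (st.insert d (m, m), some d) := by
        unfold pvSStep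
        simp [hprev]
      rw [hstep, hspec]
      refine ⟨?_, PySem.Dict.nodup_keys_insert st d (m, m) h2, ?_, ?_, ?_⟩
      · have := insert_dictMap st tmp h1 d (m, m)
        rw [pvRangeI_singleton m hm] at this
        exact this
      · intro q hq
        rcases (PySem.Dict.mem_items_insert st d (m, m) q).1 hq with rfl | ⟨hmem, _⟩
        · exact ⟨hm, le_refl m, by show m < m + 1; omega⟩
        · have := h3 q hmem; exact ⟨this.1, this.2.1, by omega⟩
      · intro q hq hq2
        rcases (PySem.Dict.mem_items_insert st d (m, m) q).1 hq with rfl | ⟨hmem, hne2⟩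
        · rfl
        · have := (h3 q hmem).2.2; omega
      · intro d' hd'
        have : d' = d := by injection hd' with hh; exact hh.symm
        subst this
        refine ⟨m, ?_⟩
        rw [PySem.Dict.get?_insert_self]
        congr 2; omega

theorem pvInv_zero : pvInv 0 PySem.Dict.empty PySem.Dict.empty none := by
  refine ⟨rfl, ?_, ?_, ?_, ?_⟩
  · simp [PySem.Dict.keys, PySem.Dict.empty]
  · intro q hq; simp [PySem.Dict.empty] at hq
  · intro q hq; simp [PySem.Dict.empty] at hq
  · intro d hd; simp at hd

theorem pvFoldAS (l : List Int) : ∀ (m : Int) (tmp : PySem.Dict Int (List Int))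
    (st : PySem.Dict Int (Int × Int)) (prev : Option Int), 0 ≤ m → pvInv m tmp st prev →
    pvInv (m + l.length)
      ((PySem.List.enumerate l m).foldl pvStepD tmp)
      ((PySem.List.enumerate l m).foldl pvSStep (st, prev)).1
      ((PySem.List.enumerate l m).foldl pvSStep (st, prev)).2 := by
  induction l with
  | nil => intro m tmp st prev hm h; simpa [PySem.List.enumerate] using h
  | cons d l ih =>
    intro m tmp st prev hm h
    rw [PySem.List.enumerate_cons]
    simp only [List.foldl_cons]
    have hstep := pvInv_step m tmp st prev d hm h
    have hrec := ih (m + 1) _ _ _ (by omega) hstep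
    simp only [Prod.mk.eta] at hrec
    have harith : m + ((d :: l).length : Int) = (m + 1) + (l.length : Int) := by
      simp only [List.length_cons]; push_cast; omega
    rw [harith]
    exact hrec

theorem enumerate_map {α β : Type} (g : α → β) (xs : List α) : ∀ (s : Int),
    PySem.List.enumerate (xs.map g) s = (PySem.List.enumerate xs s).map (fun p => (p.1, g p.2)) := by
  induction xs with
  | nil => intro s; rfl
  | cons x xs ih =>
    intro s
    rw [List.map_cons, PySem.List.enumerate_cons, PySem.List.enumerate_cons, ih, List.map_cons]

theorem enumerate_append (xs ys : List Int) : ∀ (s : Int),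
    PySem.List.enumerate (xs ++ ys) s
      = PySem.List.enumerate xs s ++ PySem.List.enumerate ys (s + xs.length) := by
  induction xs with
  | nil => intro s; simp [PySem.List.enumerate]
  | cons x xs ih =>
    intro s
    rw [List.cons_append, PySem.List.enumerate_cons, PySem.List.enumerate_cons, ih, List.cons_append]
    have harr : s + 1 + (xs.length : Int) = s + ((x :: xs).length : Int) := by
      simp only [List.length_cons]; push_cast; omega
    rw [harr]

theorem pvSStep_run (r : Nat) : ∀ (X : PySem.Dict Int (Int × Int)) (d s t : Int),
    (PySem.List.enumerate (List.replicate r d) (t + 1)).foldl pvSStep (X.insert d (s, t), some d)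
      = (X.insert d (s, t + r), some d) := by
  induction r with
  | zero => intro X d s t; simp
  | succ r ih =>
    intro X d s t
    rw [List.replicate_succ, PySem.List.enumerate_cons]
    simp only [List.foldl_cons]
    have hstep : pvSStep (X.insert d (s, t), some d) (t + 1, d)
        = (X.insert d (s, t + 1), some d) := by
      unfold pvSStep
      rw [if_pos rfl]
      simp only
      rw [PySem.Dict.getD_insert_self, PySem.Dict.insert_insert_self]
    rw [hstep]
    have := ih X d s (t + 1)
    rw [this]
    rw [show ((r + 1 : Nat) : Int) = (r : Int) + 1 by push_cast; ring,
      show t + ((r:Int) + 1) = t + 1 + (r:Int) by ring]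

theorem pvSStep_run_start (r : Nat) (hr : 0 < r) (acc : PySem.Dict Int (Int × Int))
    (prev : Option Int) (d i : Int) (hne : prev ≠ some d) :
    (PySem.List.enumerate (List.replicate r d) i).foldl pvSStep (acc, prev)
      = (acc.insert d (i, i + r - 1), some d) := by
  obtain ⟨q, rfl⟩ : ∃ q, r = q + 1 := ⟨r - 1, by omega⟩
  rw [List.replicate_succ, PySem.List.enumerate_cons]
  simp only [List.foldl_cons]
  have hstep : pvSStep (acc, prev) (i, d) = (acc.insert d (i, i), some d) := by
    unfold pvSStep
    rw [if_neg hne]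
  rw [hstep, pvSStep_run q acc d i i]
  have : i + ((q:Int) + 1) - 1 = i + (q:Int) := by ring
  rw [show ((q + 1 : Nat) : Int) = (q : Int) + 1 by push_cast; ring, this]

theorem pvRunEnd_lt (diffs : List Int) (d : Int) (j : Nat) (h : j < diffs.length) :
    pvRunEnd diffs d j < diffs.length := by
  unfold pvRunEnd
  split
  · exact pvRunEnd_lt diffs d (j + 1) (by omega)
  · exact h
termination_by diffs.length - j

theorem pvRunEnd_all (diffs : List Int) (d : Int) (j : Nat) (hj : diffs.getD j 0 = d) :
    ∀ k, j ≤ k → k ≤ pvRunEnd diffs d j → diffs.getD k 0 = d := by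
  intro k hk1 hk2
  rw [pvRunEnd] at hk2
  split at hk2
  next hcond =>
    by_cases hkj : k = j
    · rw [hkj]; exact hj
    · exact pvRunEnd_all diffs d (j + 1) hcond.2 k (by omega) hk2
  next => have : k = j := by omega
          rw [this]; exact hj
termination_by diffs.length - j

theorem pvRunEnd_stop (diffs : List Int) (d : Int) (j : Nat) :
    ¬ (pvRunEnd diffs d j + 1 < diffs.length ∧ diffs.getD (pvRunEnd diffs d j + 1) 0 = d) := by
  rw [pvRunEnd]
  split
  · exact pvRunEnd_stop diffs d (j + 1)
  next hcond => exact hcond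
termination_by diffs.length - j

theorem pvRuns_eq_spec (diffs : List Int) (i : Nat) (acc : PySem.Dict Int (Int × Int))
    (prev : Option Int)
    (hfold : (PySem.List.enumerate (diffs.take i) 0).foldl pvSStep (PySem.Dict.empty, none) = (acc, prev))
    (hstart : i < diffs.length → prev ≠ some (diffs.getD i 0)) :
    pvRuns diffs i acc
      = ((PySem.List.enumerate diffs 0).foldl pvSStep (PySem.Dict.empty, none)).1 := by
  by_cases h : i < diffs.length
  · rw [pvRuns, dif_pos h]
    have hij : i ≤ pvRunEnd diffs (diffs.getD i 0) i := pvRunEnd_le diffs (diffs.getD i 0) i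
    have hjlt : pvRunEnd diffs (diffs.getD i 0) i < diffs.length :=
      pvRunEnd_lt diffs (diffs.getD i 0) i h
    set d := diffs.getD i 0 with hd
    set j := pvRunEnd diffs d i with hjdef
    have htake : diffs.take (j + 1) = diffs.take i ++ List.replicate (j + 1 - i) d := by
      have hsplit : diffs.take (j + 1) = diffs.take i ++ (diffs.drop i).take (j + 1 - i) := by
        rw [← List.take_add]
        congr 1
        omega
      rw [hsplit]
      congr 1
      have hlen2 : ((diffs.drop i).take (j + 1 - i)).length = j + 1 - i := by
        simp [List.length_take, List.length_drop]
        omega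
      rw [List.eq_replicate_iff]
      refine ⟨hlen2, ?_⟩
      intro b hb
      obtain ⟨k, hk, rfl⟩ := List.mem_iff_getElem.1 hb
      have hk2 : k < j + 1 - i := by rw [hlen2] at hk; exact hk
      rw [List.getElem_take, List.getElem_drop]
      have hall := pvRunEnd_all diffs d i hd.symm (i + k) (by omega) (by omega)
      rw [List.getD_eq_getElem diffs 0 (by omega)] at hall
      exact hall
    have hfold2 : (PySem.List.enumerate (diffs.take (j + 1)) 0).foldl pvSStep
        (PySem.Dict.empty, none) = (acc.insert d ((i : Int), (j : Int)), some d) := by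
      rw [htake, enumerate_append, List.foldl_append, hfold]
      have hlen : ((diffs.take i).length : Int) = (i : Int) := by
        simp [List.length_take]
        omega
      rw [hlen]
      rw [pvSStep_run_start (j + 1 - i) (by omega) acc prev d (0 + (i : Int)) (hstart h)]
      congr 3
      · omega
      · push_cast; omega
    have hstop := pvRunEnd_stop diffs d i
    refine pvRuns_eq_spec diffs (j + 1) _ _ hfold2 ?_
    intro hlt hc
    injection hc with hc
    exact hstop ⟨by omega, hc.symm⟩
  · rw [pvRuns, dif_neg h]
    have htake : diffs.take i = diffs := List.take_of_length_le (by omega)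
    rw [htake] at hfold
    rw [hfold]
termination_by diffs.length - i
decreasing_by have := pvRunEnd_le diffs (diffs.getD i 0) i; omega

theorem pvZipWith_eq_map_zip (xs ys : List Int) :
    List.zipWith (fun a b => b - a) xs ys = (xs.zip ys).map (fun q => q.2 - q.1) := by
  induction xs generalizing ys with
  | nil => simp
  | cons x xs ih =>
    cases ys with
    | nil => simp
    | cons y ys => simp [ih]

theorem pvDiffs_eq (arr : List Int) :
    (List.range (arr.length - 1)).map (fun i => arr.getD (i + 1) 0 - arr.getD i 0)
      = List.zipWith (fun a b => b - a) arr (arr.drop 1) := by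
  apply List.ext_getElem
  · simp only [List.length_map, List.length_range, List.length_zipWith, List.length_drop]
    omega
  · intro i h1 h2
    simp only [List.getElem_map, List.getElem_range, List.getElem_zipWith, List.getElem_drop]
    have hi : i < arr.length - 1 := by simpa using h1
    rw [List.getD_eq_getElem arr 0 (by omega), List.getD_eq_getElem arr 0 (by omega)]
    congr 2 <;> omega

theorem pvRangeI_length (s e : Int) : (pvRangeI s e).length = e.toNat + 1 - s.toNat := by
  simp [pvRangeI]

theorem pvRangeI_headD (s e : Int) (h0 : 0 ≤ s) (h1 : s ≤ e) : (pvRangeI s e).headD 0 = s := by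
  unfold pvRangeI
  have : e.toNat + 1 - s.toNat = (e.toNat - s.toNat) + 1 := by omega
  rw [this, List.range'_succ]
  simp
  omega

theorem pvRangeI_getLastD (s e : Int) (h0 : 0 ≤ s) (h1 : s ≤ e) :
    (pvRangeI s e).getLastD 0 = e := by
  unfold pvRangeI
  have : e.toNat + 1 - s.toNat = (e.toNat - s.toNat) + 1 := by omega
  rw [this, List.range'_concat, List.map_append]
  simp
  omega

-- ===== VERDICT (by name: the statement is the Claim_ definition above) =====
theorem sum_of_regular_numbers_spec : Claim_equal_sum_of_regular_numbers := by
  intro arr _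
  unfold Spec_sum_of_regular_numbers sum_of_regular_numbers sum_of_regular_numbers_alt
  simp only
  rw [pvDiffs_eq arr]
  set diffs := List.zipWith (fun a b => b - a) arr (arr.drop 1) with hdiffs
  -- A's fold over enumerated pairs = the pvStepD fold over the enumerated differences
  have hzip : PySem.List.slice arr (some 1) none = arr.drop 1 := by
    rw [PySem.List.slice_from_one, ← List.drop_one]
  rw [hzip]
  have hmapdiffs : diffs = (List.zip arr (arr.drop 1)).map (fun q => q.2 - q.1) := by
    rw [hdiffs, pvZipWith_eq_map_zip]
  have hAfold : (PySem.List.enumerate (List.zip arr (arr.drop 1)) 0).foldl pvAStep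
      PySem.Dict.empty = (PySem.List.enumerate diffs 0).foldl pvStepD PySem.Dict.empty := by
    rw [hmapdiffs, enumerate_map, List.foldl_map]
    rfl
  rw [hAfold]
  -- invariant at the end of the first loop
  have hinv := pvFoldAS diffs 0 PySem.Dict.empty PySem.Dict.empty none (le_refl 0) pvInv_zero
  obtain ⟨hI1, hI2, hI3, hI4, hI5⟩ := hinv
  -- B's run loop computes the same spec dict
  have hB : pvRuns diffs 0 PySem.Dict.empty
      = ((PySem.List.enumerate diffs 0).foldl pvSStep (PySem.Dict.empty, none)).1 := by
    apply pvRuns_eq_spec diffs 0 PySem.Dict.empty none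
    · rfl
    · intro _ hc; simp at hc
  rw [hB]
  set stF := ((PySem.List.enumerate diffs 0).foldl pvSStep (PySem.Dict.empty, none)).1 with hstF
  -- final summation loops agree entry by entry
  rw [hI1]
  rw [List.foldl_map]
  unfold PySem.Dict.values
  rw [List.foldl_map]
  apply PySem.List.foldl_congr_mem
  intro acc q hq
  obtain ⟨hb0, hb1, _⟩ := hI3 q hq
  simp only
  rw [pvRangeI_length, pvRangeI_headD q.2.1 q.2.2 hb0 hb1, pvRangeI_getLastD q.2.1 q.2.2 hb0 hb1]
  by_cases hlt : q.2.1 < q.2.2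
  · rw [if_pos (by omega), if_pos hlt]
  · rw [if_neg (by omega), if_neg hlt]
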